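-- pv_equiv track=rewrite | github.com/Shareyar801/Crypotography | SNH Encryption.py | segment_bit_shifting
-- ===== SOURCE A (Python) =====
-- def segment_bit_shifting(a):
--     first_segment_state=False
--     second_segment_state=False
--     third_segment_state=False
--
--     # if first segmnet have only 1 zero bit
--     if int(a[0].count('0')) == 1:
--         first_segment_state=True
--     # if second segmnet have only 1 one bit
--     if int(a[1].count('1')) == 1:
--         second_segment_state=True
--     # if third and fourth segmnet combined have only 2 zero bits or 2 one bits
--     if int(a[2].count('0') + a[3].count('0')) == 2:
--             third_segment_state = True
--     elif int(a[2].count('1') + a[3].count('1')) == 2: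
--             third_segment_state = True
--
--
--
--     a = list(a[0] + a[1] + a[2] + a[3])
--
--     # shift 1 bit to left side
--     if first_segment_state == True:
--         a.append(a[0])
--         a.pop(0)
--     # shift 2 bits to left side
--     if second_segment_state == True:
--         i = 0
--         while i < 2:
--
--             a.append(a[0])
--             a.pop(0)
--             i +=1
--     # shift 4 bits to left side
--     if third_segment_state == True:
--         i = 0
--         while i < 4:
--
--             a.append(a[0])
--             a.pop(0)
--             i +=1
--
--     temp_a = ''
--     shifted_bits = []
--     for i in a:
--         temp_a = str(temp_a) + str(i)
--         if len(temp_a) == 4: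
--             shifted_bits.append(temp_a)
--             temp_a = ''
--
--     return shifted_bits
-- ===== SOURCE B (Python) =====
-- def segment_bit_shifting(a):
--     s = a[0] + a[1] + a[2] + a[3]
--     total = 0
--     if a[0].count('0') == 1:
--         total += 1
--     if a[1].count('1') == 1:
--         total += 2
--     if a[2].count('0') + a[3].count('0') == 2 or a[2].count('1') + a[3].count('1') == 2:
--         total += 4
--     if s:
--         k = total % len(s)
--         s = s[k:] + s[:k]
--     out = []
--     while len(s) >= 4:
--         out.append(s[:4])
--         s = s[4:]
--     return out
-- ===== Notes on version B (the rewrite author's own statement) =====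
-- stated objective: simpler
-- what changed: B replaces A's sequential one-element append/pop shift loops by a single rotation computed as two slices (shift total mod length), and replaces A's character-by-character accumulator chunking by a while loop slicing off 4-character groups.
import Mathlib
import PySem

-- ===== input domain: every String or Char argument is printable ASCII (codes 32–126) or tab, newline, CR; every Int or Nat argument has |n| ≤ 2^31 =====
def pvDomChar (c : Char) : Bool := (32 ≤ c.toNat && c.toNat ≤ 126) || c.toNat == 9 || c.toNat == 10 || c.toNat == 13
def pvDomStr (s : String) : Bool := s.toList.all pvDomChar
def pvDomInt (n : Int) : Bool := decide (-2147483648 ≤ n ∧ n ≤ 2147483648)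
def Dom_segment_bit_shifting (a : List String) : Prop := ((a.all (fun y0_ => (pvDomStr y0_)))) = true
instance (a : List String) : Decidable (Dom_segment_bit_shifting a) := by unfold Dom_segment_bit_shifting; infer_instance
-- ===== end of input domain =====

-- B replaces A's sequential append/pop shift loops by a single slice rotation (by the
-- total shift mod length) and A's character-accumulator chunking by a simple while loop
-- taking 4-character slices; objective: simpler, same O(n) cost.

-- ===== PORT A =====
-- one 'a.append(a[0]); a.pop(0)' step; [] is unreachable in Python on inputs in Pre_
def pyShift1 (l : List Char) : List Char :=
  match l with
  | [] => []
  | x :: xs => xs ++ [x]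

-- the 'while i < n' loop of repeated append/pop steps
def pyShiftN : Nat → List Char → List Char
  | 0, l => l
  | n + 1, l => pyShiftN n (pyShift1 l)

-- the body of A's final for-loop: temp_a accumulation, flush at length 4
def chunkStep (st : List Char × List String) (c : Char) : List Char × List String :=
  let t := st.1 ++ [c]
  if t.length = 4 then ([], st.2 ++ [String.ofList t]) else (t, st.2)

def segment_bit_shifting (a : List String) : List String :=
  match a with
  | a0 :: a1 :: a2 :: a3 :: _ =>
    let first_state := PySem.Str.count a0 "0" == 1
    let second_state := PySem.Str.count a1 "1" == 1
    let third_state :=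
      if PySem.Str.count a2 "0" + PySem.Str.count a3 "0" == 2 then true
      else if PySem.Str.count a2 "1" + PySem.Str.count a3 "1" == 2 then true
      else false
    let s0 := a0.toList ++ a1.toList ++ a2.toList ++ a3.toList
    let s1 := if first_state then pyShift1 s0 else s0
    let s2 := if second_state then pyShiftN 2 s1 else s1
    let s3 := if third_state then pyShiftN 4 s2 else s2
    (s3.foldl chunkStep ([], [])).2
  | _ => []  -- Python raises IndexError here (excluded by Pre_)

-- ===== PORT B =====
-- Source B's 'while len(s) >= 4: out.append(s[:4]); s = s[4:]'
def chunkWhile (s : List Char) : List String :=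
  if 4 ≤ s.length then String.ofList (s.take 4) :: chunkWhile (s.drop 4) else []
termination_by s.length
decreasing_by simp; omega

def segment_bit_shifting_alt (a : List String) : List String :=
  -- a[0] … a[3]; Python raises IndexError on shorter lists (excluded by Pre_)
  let a0 := a.getD 0 ""
  let a1 := a.getD 1 ""
  let a2 := a.getD 2 ""
  let a3 := a.getD 3 ""
  let s := a0.toList ++ a1.toList ++ a2.toList ++ a3.toList
  let total : Nat :=
    (if PySem.Str.count a0 "0" == 1 then 1 else 0) +
    (if PySem.Str.count a1 "1" == 1 then 2 else 0) +
    (if (PySem.Str.count a2 "0" + PySem.Str.count a3 "0" == 2)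
        || (PySem.Str.count a2 "1" + PySem.Str.count a3 "1" == 2) then 4 else 0)
  let s' :=
    if s.isEmpty then s
    else
      let k := total % s.length
      s.drop k ++ s.take k
  chunkWhile s'

-- ===== PRECONDITION & SPEC =====
-- Pre_ excludes exactly the lists with fewer than 4 elements, on which A raises IndexError.
def Pre_segment_bit_shifting (a : List String) : Prop := 4 ≤ a.length
instance (a : List String) : Decidable (Pre_segment_bit_shifting a) := by
  unfold Pre_segment_bit_shifting; infer_instance

def pvWitness_segment_bit_shifting : List String := ["1011", "0100", "0011", "1111"]

def Spec_segment_bit_shifting (a : List String) (out : List String) : Prop := out = segment_bit_shifting_alt a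
instance (a : List String) (out : List String) : Decidable (Spec_segment_bit_shifting a out) := by unfold Spec_segment_bit_shifting; infer_instance

-- ===== CLAIM (what is proved, stated in full; the proofs are below) =====
def Claim_equal_segment_bit_shifting : Prop := ∀ (a : List String), Dom_segment_bit_shifting a → Pre_segment_bit_shifting a → Spec_segment_bit_shifting a (segment_bit_shifting a)

-- ===== LEMMAS AND PROOFS =====

theorem pyShift1_eq_rotate (l : List Char) : pyShift1 l = l.rotate 1 := by
  cases l <;> simp [pyShift1, List.rotate_cons_succ]

theorem pyShiftN_eq_rotate (n : Nat) (l : List Char) : pyShiftN n l = l.rotate n := by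
  induction n generalizing l with
  | zero => simp [pyShiftN]
  | succ n ih =>
    simp [pyShiftN, ih, pyShift1_eq_rotate, List.rotate_rotate, Nat.add_comm]

theorem foldl_chunkStep (l : List Char) :
    ∀ out, (l.foldl chunkStep ([], out)).2 = out ++ chunkWhile l := by
  induction l using chunkWhile.induct with
  | case1 s h ih =>
    rcases s with _ | ⟨c1, _ | ⟨c2, _ | ⟨c3, _ | ⟨c4, rest⟩⟩⟩⟩ <;> simp at h
    intro out
    rw [chunkWhile]
    simp only [List.length_cons, List.foldl, chunkStep]
    simp only [List.length_append, List.length_cons, List.length_nil]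
    norm_num
    simpa using ih (out ++ [String.ofList [c1, c2, c3, c4]])
  | case2 s h =>
    rcases s with _ | ⟨c1, _ | ⟨c2, _ | ⟨c3, _ | ⟨c4, rest⟩⟩⟩⟩ <;>
      simp_all [List.foldl, chunkStep, chunkWhile]

theorem shift_chain_eq (s : List Char) (b1 b2 b3 : Bool) :
    (if b3 then pyShiftN 4 (if b2 then pyShiftN 2 (if b1 then pyShift1 s else s)
                            else (if b1 then pyShift1 s else s))
     else (if b2 then pyShiftN 2 (if b1 then pyShift1 s else s)
           else (if b1 then pyShift1 s else s)))
    = (if s.isEmpty then s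
       else
         let k := ((if b1 then 1 else 0) + (if b2 then 2 else 0) + (if b3 then 4 else 0)) % s.length
         s.drop k ++ s.take k) := by
  have lhs_eq : (if b3 then pyShiftN 4 (if b2 then pyShiftN 2 (if b1 then pyShift1 s else s)
                            else (if b1 then pyShift1 s else s))
     else (if b2 then pyShiftN 2 (if b1 then pyShift1 s else s)
           else (if b1 then pyShift1 s else s)))
      = s.rotate ((if b1 then 1 else 0) + (if b2 then 2 else 0) + (if b3 then 4 else 0)) := by
    cases b1 <;> cases b2 <;> cases b3 <;>
      simp [pyShift1_eq_rotate, pyShiftN_eq_rotate, List.rotate_rotate]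
  rw [lhs_eq]
  rcases s with _ | ⟨c, t⟩
  · simp
  · have hne : ((c :: t).isEmpty) = false := by simp
    rw [hne]
    simp only [Bool.false_eq_true, if_false]
    have hpos : 0 < (c :: t).length := by simp
    have hk := Nat.mod_lt ((if b1 then 1 else 0) + (if b2 then 2 else 0) + (if b3 then 4 else 0)) hpos
    rw [← List.rotate_mod, List.rotate_eq_drop_append_take (Nat.le_of_lt hk)]

-- ===== VERDICT (by name: the statement is the Claim_ definition above) =====
theorem segment_bit_shifting_spec : Claim_equal_segment_bit_shifting := by
  intro a _ hpre
  unfold Spec_segment_bit_shifting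
  rcases a with _ | ⟨a0, _ | ⟨a1, _ | ⟨a2, _ | ⟨a3, rest⟩⟩⟩⟩
  · exact absurd hpre (by unfold Pre_segment_bit_shifting; simp)
  · exact absurd hpre (by unfold Pre_segment_bit_shifting; simp)
  · exact absurd hpre (by unfold Pre_segment_bit_shifting; simp)
  · exact absurd hpre (by unfold Pre_segment_bit_shifting; simp)
  simp only [segment_bit_shifting, segment_bit_shifting_alt, List.getD_cons_zero,
    List.getD_cons_succ]
  rw [foldl_chunkStep]
  have hb3 : (if PySem.Str.count a2 "0" + PySem.Str.count a3 "0" == 2 then true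
      else if PySem.Str.count a2 "1" + PySem.Str.count a3 "1" == 2 then true
      else false)
      = ((PySem.Str.count a2 "0" + PySem.Str.count a3 "0" == 2)
          || (PySem.Str.count a2 "1" + PySem.Str.count a3 "1" == 2)) := by
    by_cases h1 : (PySem.Str.count a2 "0" + PySem.Str.count a3 "0" == 2) = true <;>
      by_cases h2 : (PySem.Str.count a2 "1" + PySem.Str.count a3 "1" == 2) = true <;>
      simp_all
  rw [hb3, shift_chain_eq]
  simp
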